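-- pv_equiv track=rewrite | github.com/ronycharlier-byte/YNOR_MASTER_SHOWCASE | corpus_index.py | _is_derived_layer
-- ===== SOURCE A (Python) =====
-- def _is_derived_layer(path: str) -> bool:
--     lower = path.lower()
--     return any(
--         marker in lower
--         for marker in (
--             "/02_miroir_textuel/",
--             "/02_reflet/",
--             "/06_reecriture_chiastique_bulk/",
--             "/07_reecriture_json_chiastique/",
--             "/09_pdf_constitution_math_augmente",
--             "/_releases/",
--             "/_release/",
--             "/_archives/",
--             "/_archive/",
--             "/_exports/",
--             "/_export/",
--             "/_backup/",
--             "/backup/",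
--             "/mirrors/",
--             "/mirror/",
--             "/miroir/",
--             "miroir",
--             "reflet",
--             "/copies/",
--             "/copy/",
--             "/tmp_render/",
--             "/_knowledge_final_export/",
--             "/_00_dists_and_releases/",
--             "/static_corpus/",
--             "/_archives_logique_mdl/",
--             "release_pipeline",
--             "archive_",
--             "release_",
--             ".fractale.md",
--             ".backup.md",
--             ".md.md",
--             ".pdf.md",
--             ".tex.md",
--             ".json.md",
--             ".bin.md",
--             ".aux",
--             ".log",
--             ".out",
--         )
--     )
-- ===== SOURCE B (Python) =====
-- # First-character dispatch table: at each position of the lowered path, only the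
-- # markers that could possibly start there (same first character) are tested.
-- _BY_FIRST = {
--     "/": (
--         "/02_miroir_textuel/",
--         "/02_reflet/",
--         "/06_reecriture_chiastique_bulk/",
--         "/07_reecriture_json_chiastique/",
--         "/09_pdf_constitution_math_augmente",
--         "/_releases/",
--         "/_release/",
--         "/_archives/",
--         "/_archive/",
--         "/_exports/",
--         "/_export/",
--         "/_backup/",
--         "/backup/",
--         "/mirrors/",
--         "/mirror/",
--         "/miroir/",
--         "/copies/",
--         "/copy/",
--         "/tmp_render/",
--         "/_knowledge_final_export/",
--         "/_00_dists_and_releases/",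
--         "/static_corpus/",
--         "/_archives_logique_mdl/",
--     ),
--     ".": (
--         ".fractale.md",
--         ".backup.md",
--         ".md.md",
--         ".pdf.md",
--         ".tex.md",
--         ".json.md",
--         ".bin.md",
--         ".aux",
--         ".log",
--         ".out",
--     ),
--     "m": ("miroir",),
--     "r": ("reflet", "release_pipeline", "release_"),
--     "a": ("archive_",),
-- }
--
-- _EMPTY = ()
--
--
-- def _is_derived_layer(path: str) -> bool:
--     lower = path.lower()
--     for i, c in enumerate(lower):
--         for m in _BY_FIRST.get(c, _EMPTY):
--             if lower.startswith(m, i):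
--                 return True
--     return False
-- ===== Notes on version B (the rewrite author's own statement) =====
-- stated objective: alternative
-- what changed: A runs 38 independent whole-string substring scans (one per marker); B builds a dispatch table indexing the markers by their first character and makes one pass over positions of the lowered path, testing at each position only the bucket of markers whose first character matches there.
import Mathlib
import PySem

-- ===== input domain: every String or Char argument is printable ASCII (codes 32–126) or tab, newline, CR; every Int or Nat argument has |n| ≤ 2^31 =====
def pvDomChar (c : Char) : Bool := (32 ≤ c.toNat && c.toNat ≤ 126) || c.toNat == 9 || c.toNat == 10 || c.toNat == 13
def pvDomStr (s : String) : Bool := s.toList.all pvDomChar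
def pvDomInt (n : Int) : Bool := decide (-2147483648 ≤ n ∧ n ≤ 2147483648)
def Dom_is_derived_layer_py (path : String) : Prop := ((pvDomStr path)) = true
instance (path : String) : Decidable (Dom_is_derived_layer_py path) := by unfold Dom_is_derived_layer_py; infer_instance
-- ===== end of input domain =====

-- B replaces A's 38 whole-string substring scans by a first-character dispatch table:
-- one pass over positions, testing at each position only the markers whose first
-- character matches (alternative decomposition, not claimed faster).

-- ===== PORT A =====
-- A: lower = path.lower(); any(marker in lower for marker in (...))
def is_derived_layer_py (path : String) : Bool :=
  let lower := PySem.Str.lower path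
  ([ "/02_miroir_textuel/", "/02_reflet/", "/06_reecriture_chiastique_bulk/",
     "/07_reecriture_json_chiastique/", "/09_pdf_constitution_math_augmente",
     "/_releases/", "/_release/", "/_archives/", "/_archive/", "/_exports/",
     "/_export/", "/_backup/", "/backup/", "/mirrors/", "/mirror/", "/miroir/",
     "miroir", "reflet", "/copies/", "/copy/", "/tmp_render/",
     "/_knowledge_final_export/", "/_00_dists_and_releases/", "/static_corpus/",
     "/_archives_logique_mdl/", "release_pipeline", "archive_", "release_",
     ".fractale.md", ".backup.md", ".md.md", ".pdf.md", ".tex.md", ".json.md",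
     ".bin.md", ".aux", ".log", ".out" ] : List String).any
    (fun marker => PySem.Str.isIn marker lower)

-- ===== PORT B =====
-- B's module-level dispatch table _BY_FIRST: _BY_FIRST.get(c, _EMPTY)
def pvByFirst (c : Char) : List String :=
  if c = '/' then
    [ "/02_miroir_textuel/", "/02_reflet/", "/06_reecriture_chiastique_bulk/",
      "/07_reecriture_json_chiastique/", "/09_pdf_constitution_math_augmente",
      "/_releases/", "/_release/", "/_archives/", "/_archive/", "/_exports/",
      "/_export/", "/_backup/", "/backup/", "/mirrors/", "/mirror/", "/miroir/",
      "/copies/", "/copy/", "/tmp_render/", "/_knowledge_final_export/",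
      "/_00_dists_and_releases/", "/static_corpus/", "/_archives_logique_mdl/" ]
  else if c = '.' then
    [ ".fractale.md", ".backup.md", ".md.md", ".pdf.md", ".tex.md", ".json.md",
      ".bin.md", ".aux", ".log", ".out" ]
  else if c = 'm' then [ "miroir" ]
  else if c = 'r' then [ "reflet", "release_pipeline", "release_" ]
  else if c = 'a' then [ "archive_" ]
  else []

-- the position loop: `s` is the suffix of the lowered path starting at position i,
-- `c` its head; `lower.startswith(m, i)` is `m.toList <+: suffix`
def pvScanByFirst : List Char → Bool
  | [] => false
  | c :: t =>
      if (pvByFirst c).any (fun m => PySem.Chars.startswith (c :: t) m.toList) then true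
      else pvScanByFirst t

def is_derived_layer_py_alt (path : String) : Bool :=
  let lower := PySem.Str.lower path
  pvScanByFirst lower.toList

-- ===== PRECONDITION & SPEC =====
def Spec_is_derived_layer_py (path : String) (out : Bool) : Prop := out = is_derived_layer_py_alt path
instance (path : String) (out : Bool) : Decidable (Spec_is_derived_layer_py path out) := by unfold Spec_is_derived_layer_py; infer_instance

-- ===== CLAIM (what is proved, stated in full; the proofs are below) =====
def Claim_equal_is_derived_layer_py : Prop := ∀ (path : String), Dom_is_derived_layer_py path → Spec_is_derived_layer_py path (is_derived_layer_py path)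

-- ===== LEMMAS AND PROOFS =====

-- A's flat marker list (proof-only abbreviation; A's port spells it inline)
def pvAllMarkers : List String :=
  [ "/02_miroir_textuel/", "/02_reflet/", "/06_reecriture_chiastique_bulk/",
    "/07_reecriture_json_chiastique/", "/09_pdf_constitution_math_augmente",
    "/_releases/", "/_release/", "/_archives/", "/_archive/", "/_exports/",
    "/_export/", "/_backup/", "/backup/", "/mirrors/", "/mirror/", "/miroir/",
    "miroir", "reflet", "/copies/", "/copy/", "/tmp_render/",
    "/_knowledge_final_export/", "/_00_dists_and_releases/", "/static_corpus/",
    "/_archives_logique_mdl/", "release_pipeline", "archive_", "release_",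
    ".fractale.md", ".backup.md", ".md.md", ".pdf.md", ".tex.md", ".json.md",
    ".bin.md", ".aux", ".log", ".out" ]

-- every marker sits in the bucket of its first character
theorem pvMarkers_in_bucket :
    ∀ m ∈ pvAllMarkers, m ∈ pvByFirst m.toList.headI := by decide

-- every bucket element is a marker
theorem pvBucket_sub (c : Char) : ∀ m ∈ pvByFirst c, m ∈ pvAllMarkers := by
  unfold pvByFirst; split_ifs <;> decide

-- markers are nonempty
theorem pvMarkers_ne_nil : ∀ m ∈ pvAllMarkers, m.toList ≠ [] := by decide

-- bucket dispatch is complete: a marker that is a prefix of c :: t lies in bucket c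
theorem pvBucket_prefix_iff (c : Char) (t : List Char) :
    (∃ m ∈ pvAllMarkers, m.toList <+: c :: t) ↔
    (∃ m ∈ pvByFirst c, m.toList <+: c :: t) := by
  constructor
  · rintro ⟨m, hm, hp⟩
    refine ⟨m, ?_, hp⟩
    have hne := pvMarkers_ne_nil m hm
    obtain ⟨a, l, hml⟩ := List.exists_cons_of_ne_nil hne
    have hb := pvMarkers_in_bucket m hm
    rw [hml] at hp
    rcases List.cons_prefix_cons.mp hp with ⟨rfl, -⟩
    rwa [hml] at hb
  · rintro ⟨m, hm, hp⟩
    exact ⟨m, pvBucket_sub c m hm, hp⟩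

-- the position loop finds a marker iff some marker is an infix
theorem pvScanByFirst_iff (s : List Char) :
    pvScanByFirst s = true ↔ ∃ m ∈ pvAllMarkers, m.toList <:+: s := by
  induction s with
  | nil =>
      refine iff_of_false (by simp [pvScanByFirst]) ?_
      rintro ⟨m, hm, hi⟩
      exact pvMarkers_ne_nil m hm (List.eq_nil_of_infix_nil hi)
  | cons c t ih =>
      rw [pvScanByFirst]
      by_cases hc : (pvByFirst c).any (fun m => PySem.Chars.startswith (c :: t) m.toList) = true
      · rw [if_pos hc]
        simp only [List.any_eq_true, PySem.Chars.startswith_iff] at hc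
        obtain ⟨m, hm, hp⟩ := hc
        exact iff_of_true rfl ⟨m, pvBucket_sub c m hm, hp.isInfix⟩
      · rw [if_neg hc, ih]
        simp only [List.any_eq_true, PySem.Chars.startswith_iff] at hc
        push Not at hc
        constructor
        · rintro ⟨m, hm, hi⟩
          exact ⟨m, hm, List.infix_cons hi⟩
        · rintro ⟨m, hm, hi⟩
          rcases List.infix_cons_iff.mp hi with hp | h
          · obtain ⟨m', hm', hp'⟩ := (pvBucket_prefix_iff c t).mp ⟨m, hm, hp⟩
            exact absurd hp' (hc m' hm')
          · exact ⟨m, hm, h⟩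

-- ===== VERDICT (by name: the statement is the Claim_ definition above) =====
theorem is_derived_layer_py_spec : Claim_equal_is_derived_layer_py := by
  intro path _
  unfold Spec_is_derived_layer_py
  rw [Bool.eq_iff_iff]
  unfold is_derived_layer_py is_derived_layer_py_alt
  rw [pvScanByFirst_iff]
  simp only [List.any_eq_true, PySem.Str.isIn_iff_infix]
  exact ⟨fun ⟨m, hm, h⟩ => ⟨m, hm, h⟩, fun ⟨m, hm, h⟩ => ⟨m, hm, h⟩⟩
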